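-- pv_equiv track=rewrite | github.com/3lokai/IndianCoffeeBeans | scrapers/discoverers/discovery_manager.py | _deduplicate_products
-- ===== SOURCE A (Python) =====
-- from typing import List, Dict, Any, Optional, Tuple
--
-- def _deduplicate_products(products: List[Dict[str, Any]]) -> List[Dict[str, Any]]:
--     """
--     Deduplicate products based on URL.
--
--     Args:
--         products: List of product dicts
--
--     Returns:
--         Deduplicated list of products
--     """
--     unique_products = {}
--
--     for product in products:
--         url = product.get("direct_buy_url")
--
--         if not url:
--             continue
--
--         # Use URL as unique key
--         # If duplicate, only overwrite if new product has more data
--         if url not in unique_products or len(product) > len(unique_products[url]):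
--             unique_products[url] = product
--
--     return list(unique_products.values())
-- ===== SOURCE B (Python) =====
-- def _deduplicate_products(products):
--     # Two-pass shape: first group all usable products by URL (first-seen key
--     # order), then reduce each group with max(key=len), whose first-maximum
--     # rule reproduces the keep-earliest-on-tie behaviour.
--     groups = {}
--     for product in products:
--         url = product.get("direct_buy_url")
--         if not url:
--             continue
--         groups.setdefault(url, []).append(product)
--     return [max(group, key=len) for group in groups.values()]
-- ===== Notes on version B (the rewrite author's own statement) =====
-- stated objective: alternative
-- what changed: Replaces the single-pass running keep-the-richer comparison against the stored dict entry with a build-then-reduce decomposition: one pass groups products into url -> list, a second pass takes max(group, key=len) per group (first maximum = A's strict-> tie-breaking).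
import Mathlib
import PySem

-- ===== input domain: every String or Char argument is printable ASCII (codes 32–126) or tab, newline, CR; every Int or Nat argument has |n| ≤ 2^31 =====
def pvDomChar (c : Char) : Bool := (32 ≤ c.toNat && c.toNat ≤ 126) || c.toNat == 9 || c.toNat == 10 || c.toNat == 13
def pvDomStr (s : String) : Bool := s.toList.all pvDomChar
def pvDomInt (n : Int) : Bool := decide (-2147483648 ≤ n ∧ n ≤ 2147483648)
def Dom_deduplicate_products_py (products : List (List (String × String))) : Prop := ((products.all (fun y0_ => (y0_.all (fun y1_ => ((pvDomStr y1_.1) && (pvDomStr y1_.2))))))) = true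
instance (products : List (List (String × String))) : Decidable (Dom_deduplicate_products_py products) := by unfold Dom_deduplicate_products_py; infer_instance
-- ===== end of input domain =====

-- B replaces A's single-pass keep-the-richer update with a group-by-url pass
-- followed by a per-group first-maximum-by-length reduction (objective: alternative).


-- ===== PORT A =====
-- loop body of A: get url (dict lookup = first match on the assoc list),
-- skip falsy url, overwrite stored entry only when strictly richer
def pvStepA (d : PySem.Dict String (List (String × String))) (product : List (String × String)) : PySem.Dict String (List (String × String)) :=
  match (PySem.Dict.mk product).get? "direct_buy_url" with
  | none => d
  | some url =>
    if url = "" then d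
    else if !d.contains url || product.length > (d.getD url []).length then
      -- 'url not in unique_products or len(product) > len(unique_products[url])';
      -- the getD default is never used: the access is short-circuit-guarded by contains
      d.insert url product
    else d

def deduplicate_products_py (products : List (List (String × String))) : List (List (String × String)) :=
  (products.foldl pvStepA PySem.Dict.empty).values

-- ===== PORT B =====
-- max(group, key=len): first element of maximal length (strict > keeps the earliest)
def pvBestOf (group : List (List (String × String))) : List (String × String) :=
  match group with
  | [] => []
  | h :: t => t.foldl (fun b p => if p.length > b.length then p else b) h

-- loop body of B: groups.setdefault(url, []).append(product)
def pvStepB (g : PySem.Dict String (List (List (String × String)))) (product : List (String × String)) : PySem.Dict String (List (List (String × String))) :=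
  match (PySem.Dict.mk product).get? "direct_buy_url" with
  | none => g
  | some url =>
    if url = "" then g
    else g.modify url [] (· ++ [product])

def deduplicate_products_py_alt (products : List (List (String × String))) : List (List (String × String)) :=
  ((products.foldl pvStepB PySem.Dict.empty).values).map pvBestOf

-- ===== PRECONDITION & SPEC =====
def Spec_deduplicate_products_py (products : List (List (String × String))) (out : List (List (String × String))) : Prop := out = deduplicate_products_py_alt products
instance (products : List (List (String × String))) (out : List (List (String × String))) : Decidable (Spec_deduplicate_products_py products out) := by unfold Spec_deduplicate_products_py; infer_instance

-- ===== CLAIM (what is proved, stated in full; the proofs are below) =====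
def Claim_equal_deduplicate_products_py : Prop := ∀ (products : List (List (String × String))), Dom_deduplicate_products_py products → Spec_deduplicate_products_py products (deduplicate_products_py products)

-- ===== LEMMAS AND PROOFS =====

-- invariant relating A's running dict to B's groups: same keys (same order),
-- and A's stored entry is the first maximum-by-length of B's group
def pvInv (dA : PySem.Dict String (List (String × String))) (dB : PySem.Dict String (List (List (String × String)))) : Prop :=
  dA.keys = dB.keys ∧ ∀ k, dA.getD k [] = pvBestOf (dB.getD k [])

theorem pvBestOf_snoc (g : List (List (String × String))) (p : List (String × String)) :
    pvBestOf (g ++ [p]) = if p.length > (pvBestOf g).length then p else pvBestOf g := by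
  cases g with
  | nil =>
    simp only [List.nil_append, pvBestOf, List.foldl_nil]
    cases p <;> simp
  | cons h t =>
    simp [pvBestOf, List.foldl_append]

theorem pvStep_inv (dA : PySem.Dict String (List (String × String)))
    (dB : PySem.Dict String (List (List (String × String))))
    (p : List (String × String)) (h : pvInv dA dB) : pvInv (pvStepA dA p) (pvStepB dB p) := by
  obtain ⟨hk, hv⟩ := h
  unfold pvStepA pvStepB
  cases hurl : (PySem.Dict.mk p).get? "direct_buy_url" with
  | none => exact ⟨hk, hv⟩
  | some url =>
    by_cases he : url = ""
    · simp [he]; exact ⟨hk, hv⟩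
    · simp only [if_neg he]
      have hcont : dA.contains url = dB.contains url := by
        rw [PySem.Dict.contains_eq_decide_mem_keys, PySem.Dict.contains_eq_decide_mem_keys, hk]
      by_cases hc : dB.contains url = true
      · -- url already grouped: B extends the group, A overwrites iff strictly richer
        constructor
        · rw [PySem.Dict.keys_modify, PySem.Dict.keys_insert_of_contains _ _ hc]
          by_cases hbig : p.length > (dA.getD url []).length
          · simp only [hcont, hc, hbig]
            simp only [Bool.not_true, Bool.false_or, decide_true, if_true]
            rw [PySem.Dict.keys_insert_of_contains _ _ (hcont ▸ hc), hk]
          · simp only [hcont, hc, Bool.not_true, Bool.false_or]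
            simp only [hbig, decide_false]
            exact hk
        · intro k
          rw [PySem.Dict.getD_modify]
          by_cases hbig : p.length > (dA.getD url []).length
          · simp only [hcont, hc, Bool.not_true, Bool.false_or, hbig, decide_true, if_true]
            rw [PySem.Dict.getD_insert]
            by_cases hku : k = url
            · subst hku
              simp only [if_true, pvBestOf_snoc, ← hv k]
              simp [hbig]
            · simp only [if_neg hku]; exact hv k
          · simp only [hcont, hc, Bool.not_true, Bool.false_or, hbig, decide_false,
                       Bool.false_eq_true, if_false]
            by_cases hku : k = url
            · subst hku
              simp only [if_true, pvBestOf_snoc, ← hv k]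
              simp [hbig]
            · simp only [if_neg hku]; exact hv k
      · -- url is new in both dicts: both append it at the end
        have hc' : dB.contains url = false := by simpa using hc
        have hcA : dA.contains url = false := by rw [hcont]; exact hc'
        simp only [hcA, Bool.not_false, Bool.true_or, if_true]
        constructor
        · rw [PySem.Dict.keys_modify, PySem.Dict.keys_insert_of_not_contains _ _ hc',
              PySem.Dict.keys_insert_of_not_contains _ _ hcA, hk]
        · intro k
          rw [PySem.Dict.getD_insert, PySem.Dict.getD_modify]
          by_cases hku : k = url
          · subst hku
            rw [if_pos rfl, if_pos rfl, PySem.Dict.getD_of_not_contains _ _ hc']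
            rfl
          · simp only [if_neg hku]; exact hv k

theorem pvFold_inv (l : List (List (String × String)))
    (dA : PySem.Dict String (List (String × String)))
    (dB : PySem.Dict String (List (List (String × String))))
    (h : pvInv dA dB) : pvInv (l.foldl pvStepA dA) (l.foldl pvStepB dB) := by
  induction l generalizing dA dB with
  | nil => exact h
  | cons p t ih => exact ih _ _ (pvStep_inv dA dB p h)

theorem pvNodupA (l : List (List (String × String))) (d : PySem.Dict String (List (String × String)))
    (h : d.keys.Nodup) : (l.foldl pvStepA d).keys.Nodup := by
  induction l generalizing d with
  | nil => exact h
  | cons p t ih =>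
    refine ih _ ?_
    unfold pvStepA
    cases (PySem.Dict.mk p).get? "direct_buy_url" with
    | none => exact h
    | some url =>
      by_cases he : url = ""
      · simpa [he]
      · simp only [if_neg he]
        split
        · exact PySem.Dict.nodup_keys_insert _ _ _ h
        · exact h

theorem pvNodupB (l : List (List (String × String))) (d : PySem.Dict String (List (List (String × String))))
    (h : d.keys.Nodup) : (l.foldl pvStepB d).keys.Nodup := by
  induction l generalizing d with
  | nil => exact h
  | cons p t ih =>
    refine ih _ ?_
    unfold pvStepB
    cases (PySem.Dict.mk p).get? "direct_buy_url" with
    | none => exact h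
    | some url =>
      by_cases he : url = ""
      · simpa [he]
      · simp only [if_neg he]
        rw [show ((PySem.Dict.modify d url [] (· ++ [p])).keys)
              = ((d.insert url ((d.getD url []) ++ [p])).keys) from PySem.Dict.keys_modify ..]
        exact PySem.Dict.nodup_keys_insert _ _ _ h

-- ===== VERDICT (by name: the statement is the Claim_ definition above) =====
theorem deduplicate_products_py_spec : Claim_equal_deduplicate_products_py := by
  intro products _
  unfold Spec_deduplicate_products_py deduplicate_products_py deduplicate_products_py_alt
  have hinv : pvInv (products.foldl pvStepA PySem.Dict.empty) (products.foldl pvStepB PySem.Dict.empty) := by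
    refine pvFold_inv _ _ _ ⟨?_, ?_⟩
    · simp [PySem.Dict.keys_empty]
    · intro k; simp [PySem.Dict.getD_empty, pvBestOf]
  obtain ⟨hk, hv⟩ := hinv
  have hnA := pvNodupA products PySem.Dict.empty (by simp [PySem.Dict.keys_empty])
  have hnB := pvNodupB products PySem.Dict.empty (by simp [PySem.Dict.keys_empty])
  rw [PySem.Dict.values_eq_map_keys _ hnA [], PySem.Dict.values_eq_map_keys _ hnB [],
      List.map_map, hk]
  exact List.map_congr_left (fun k _ => hv k)
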